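-- pv_equiv track=rewrite | github.com/FilipBienkowski3/ASD | Zadania offline/zad3/zad3.py | strong_string
-- ===== SOURCE A (Python) =====
-- def strong_string(T):
--     # tu prosze wpisac wlasna implementacje
--     maxi = 1
--     counter = 0
--     n = len(T)
--     low = 0
--     high = n - 1
--     while low < high:
--         pivot = T[high]
--         i = low - 1
--         for j in range(low, high):
--             if T[j] == pivot or T[j][::-1] == pivot:
--                 i = i + 1
--                 T[i], T[j] = T[j], T[i]
--         T[i + 1], T[high] = T[high], T[i + 1]
--         pi = i + 1
--         maxi = max(maxi, pi + 1 - counter)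
--         counter += (pi + 1)-counter
--         low = pi + 1
--     return maxi
-- ===== SOURCE B (Python) =====
-- def strong_string(T):
--     counts = {}
--     best = 1
--     for s in T:
--         k = min(s, s[::-1])
--         c = counts.get(k, 0) + 1
--         counts[k] = c
--         if c > best:
--             best = c
--     return best
-- ===== Notes on version B (the rewrite author's own statement) =====
-- stated objective: faster
-- what changed: Replaces the quadratic repeated Lomuto-style in-place partitioning by pivot with a single pass that counts each string's normal form min(s, s[::-1]) in a dict while tracking the running maximum count (floor 1).
import Mathlib
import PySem

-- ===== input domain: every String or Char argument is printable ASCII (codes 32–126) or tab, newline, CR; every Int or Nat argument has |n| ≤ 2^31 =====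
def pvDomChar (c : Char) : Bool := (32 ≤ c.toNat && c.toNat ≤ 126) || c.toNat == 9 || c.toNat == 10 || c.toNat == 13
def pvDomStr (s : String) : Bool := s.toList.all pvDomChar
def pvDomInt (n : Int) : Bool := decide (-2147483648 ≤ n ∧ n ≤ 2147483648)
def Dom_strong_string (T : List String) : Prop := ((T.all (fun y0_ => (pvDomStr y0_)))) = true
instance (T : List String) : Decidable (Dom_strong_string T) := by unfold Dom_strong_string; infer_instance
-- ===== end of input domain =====

-- B replaces A's quadratic repeated in-place partitioning with one counting pass over the
-- normal forms min(s, s[::-1]); the return values agree on every input.  A mutates its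
-- argument list in place and B does not — the equivalence proved here is about the
-- return value only.

-- ===== PORT A =====

-- s[::-1] on a string reverses its code points (exact)
def revS (s : String) : String := String.ofList s.toList.reverse

-- T[a], T[b] = T[b], T[a]  (both reads happen before the writes; indices are in range
-- whenever A executes this, so getD is exact)
def swapL (T : List String) (a b : Nat) : List String :=
  (T.set a (T.getD b "")).set b (T.getD a "")

-- the inner 'for j in range(low, high)' loop of A; fuel = high - j
def partA (pivot : String) : Nat → Nat → List String → Int → List String × Int
  | 0, _, T, i => (T, i)
  | fuel + 1, j, T, i =>
    if T.getD j "" = pivot ∨ revS (T.getD j "") = pivot then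
      partA pivot fuel (j + 1) (swapL T (i + 1).toNat j) (i + 1)
    else
      partA pivot fuel (j + 1) T i

-- the outer 'while low < high' loop of A; low strictly increases each round, so fuel
-- n = len(T) is never exhausted on the rounds Python actually runs
def outerA : Nat → List String → Nat → Int → Int → Nat → Int
  | 0, _, _, _, maxi, _ => maxi
  | fuel + 1, T, low, counter, maxi, high =>
    if low < high then
      let pivot := T.getD high ""
      let r := partA pivot (high - low) low T ((low : Int) - 1)
      let pi : Int := r.2 + 1
      let T2 := swapL r.1 pi.toNat high
      let maxi' := max maxi (pi + 1 - counter)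
      let counter' := counter + ((pi + 1) - counter)
      outerA fuel T2 (pi + 1).toNat counter' maxi' high
    else maxi

def strong_string (T : List String) : Int :=
  outerA T.length T 0 0 1 (T.length - 1)

-- ===== PORT B =====

-- min(s, s[::-1])  (Python's min of two strings keeps the first unless the second is
-- strictly smaller; Python's str '<' is Lean's String '<')
def normS (s : String) : String := if revS s < s then revS s else s

def strong_string_alt (T : List String) : Int :=
  (T.foldl (fun (st : PySem.Dict String Int × Int) s =>
      let k := normS s
      let c := st.1.getD k 0 + 1
      (st.1.insert k c, if c > st.2 then c else st.2))
    (PySem.Dict.empty, 1)).2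

-- ===== PRECONDITION & SPEC =====
def Spec_strong_string (T : List String) (out : Int) : Prop := out = strong_string_alt T
instance (T : List String) (out : Int) : Decidable (Spec_strong_string T out) := by unfold Spec_strong_string; infer_instance

-- ===== CLAIM (what is proved, stated in full; the proofs are below) =====
def Claim_equal_strong_string : Prop := ∀ (T : List String), Dom_strong_string T → Spec_strong_string T (strong_string T)

-- ===== LEMMAS AND PROOFS =====

-- the class predicate of one of A's partition rounds: 'T[j] == pivot or T[j][::-1] == pivot'
def pb (pivot t : String) : Bool := (t == pivot) || (revS t == pivot)

-- the largest multiplicity of any key in the multiset K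
def gK (K : Multiset String) : Nat := K.toFinset.sup (fun k => K.count k)

-- one-step rotation, the effect of a Lomuto swap on the unmatched block
def rot (l : List String) : List String := l.tail ++ l.take 1

theorem revS_revS (s : String) : revS (revS s) = s := by
  simp [revS, String.toList_ofList]

theorem revS_inj (s t : String) (h : revS s = revS t) : s = t := by
  have := congrArg revS h
  rwa [revS_revS, revS_revS] at this

theorem norm_revS (s : String) : normS (revS s) = normS s := by
  unfold normS
  rw [revS_revS]
  rcases lt_trichotomy s (revS s) with h | h | h
  · rw [if_pos h, if_neg (not_lt.mpr h.le)]
  · rw [← h]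
  · rw [if_neg (not_lt.mpr h.le), if_pos h]

theorem normS_mem (s : String) : normS s = s ∨ normS s = revS s := by
  unfold normS; split_ifs <;> simp

-- membership in the pivot's class is equality of normal forms
theorem pb_iff (pivot t : String) : pb pivot t = true ↔ normS t = normS pivot := by
  unfold pb
  simp only [Bool.or_eq_true, beq_iff_eq]
  constructor
  · rintro (rfl | h)
    · rfl
    · rw [← h, norm_revS]
  · intro h
    rcases normS_mem t with h1 | h1 <;> rcases normS_mem pivot with h2 | h2 <;>
      rw [h1, h2] at h
    · exact Or.inl h
    · right; rw [h, revS_revS]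
    · exact Or.inr h
    · left; exact revS_inj _ _ h

theorem le_gK (K : Multiset String) (j : String) (h : j ∈ K) : K.count j ≤ gK K :=
  Finset.le_sup (f := fun x => K.count x) (Multiset.mem_toFinset.mpr h)

theorem count_le_gK (K : Multiset String) (j : String) : K.count j ≤ gK K := by
  by_cases h : j ∈ K
  · exact le_gK K j h
  · simp [Multiset.count_eq_zero_of_notMem h]

theorem gK_le (K : Multiset String) (m : Nat) (h : ∀ j ∈ K, K.count j ≤ m) : gK K ≤ m := by
  apply Finset.sup_le
  intro j hj
  exact h j (Multiset.mem_toFinset.mp hj)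

-- adding one element: the maximum multiplicity is the new element's count or the old maximum
theorem gK_cons (k : String) (K : Multiset String) :
    gK (k ::ₘ K) = max (K.count k + 1) (gK K) := by
  apply le_antisymm
  · apply gK_le
    intro j hj
    rcases eq_or_ne j k with rfl | hne
    · simp [Multiset.count_cons_self]
    · rw [Multiset.count_cons_of_ne hne]
      rcases Multiset.mem_cons.mp hj with rfl | hj
      · exact absurd rfl hne
      · exact le_trans (le_gK K j hj) (le_max_right _ _)
  · apply max_le
    · rw [← Multiset.count_cons_self k K]
      exact le_gK _ k (Multiset.mem_cons_self k K)
    · apply gK_le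
      intro j hj
      exact le_trans (Multiset.count_le_count_cons ..) (le_gK _ j (Multiset.mem_cons_of_mem hj))

-- removing one whole class: the maximum multiplicity is that class's size or the rest's maximum
theorem gK_split (k : String) (K : Multiset String) :
    gK K = max (K.count k) (gK (K.filter (fun j => j ≠ k))) := by
  apply le_antisymm
  · apply gK_le
    intro j hj
    rcases eq_or_ne j k with rfl | hne
    · exact le_max_left _ _
    · refine le_trans ?_ (le_max_right _ _)
      have hc : K.count j = (K.filter (fun j => j ≠ k)).count j := by
        rw [Multiset.count_filter]; simp [hne]
      rw [hc]
      exact le_gK _ j (Multiset.mem_filter.mpr ⟨hj, hne⟩)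
  · apply max_le
    · exact count_le_gK K k
    · apply gK_le
      intro j hj
      refine le_trans (Multiset.count_le_of_le j (Multiset.filter_le _ K)) ?_
      exact le_gK _ j (Multiset.mem_of_mem_filter hj)

theorem gK_le_card (K : Multiset String) : gK K ≤ Multiset.card K := by
  apply gK_le
  intro j _
  exact Multiset.count_le_card j K

theorem getD_append_len (P R : List String) (u : String) (d : String) :
    (P ++ u :: R).getD P.length d = u := by
  induction P with
  | nil => rfl
  | cons p P ih => simpa using ih

theorem set_append_len (P R : List String) (u v : String) :
    (P ++ u :: R).set P.length v = P ++ v :: R := by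
  induction P with
  | nil => rfl
  | cons p P ih => simpa using ih

theorem rot_perm (l : List String) : (rot l).Perm l := by
  cases l with
  | nil => rfl
  | cons a l => simpa [rot] using (List.perm_append_comm (l₁ := l) (l₂ := [a]))

-- one Lomuto swap, seen on the block decomposition of the list
theorem swap_block (Y R : List String) (z : String) :
    ∀ P : List String, swapL (P ++ Y ++ z :: R) P.length (P.length + Y.length)
      = P ++ z :: (rot Y ++ R) := by
  intro P
  induction P with
  | nil =>
    cases Y with
    | nil => simp [swapL, rot]
    | cons y0 Yr =>
      simp only [List.nil_append, List.length_nil, Nat.zero_add, List.length_cons, swapL, rot,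
        List.cons_append, List.getD_cons_succ, List.getD_cons_zero, List.set_cons_zero,
        List.set_cons_succ, List.tail_cons, List.take_succ_cons, List.take_zero]
      rw [getD_append_len, set_append_len]
      simp
  | cons p P ih =>
    have hb : (p :: P).length + Y.length = (P.length + Y.length) + 1 := by simp; omega
    rw [hb]
    simp only [List.cons_append, List.length_cons, swapL, List.getD_cons_succ,
      List.set_cons_succ] at ih ⊢
    rw [ih]

-- A's inner loop on the decomposition A ++ matched ++ unmatched ++ unscanned ++ rest:
-- matched elements are appended in order, unmatched ones accumulate as a permutation
theorem partA_spec (pivot : String) :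
    ∀ (s X Y W A : List String),
    ∃ Y', partA pivot s.length (A.length + X.length + Y.length)
            (A ++ X ++ Y ++ (s ++ W)) (((A.length + X.length : Nat) : Int) - 1)
        = (A ++ X ++ s.filter (fun t => pb pivot t) ++ (Y' ++ W),
           ((A.length + X.length + (s.filter (fun t => pb pivot t)).length : Nat) : Int) - 1)
      ∧ Y'.Perm (Y ++ s.filter (fun t => !(pb pivot t))) := by
  intro s
  induction s with
  | nil =>
    intro X Y W A
    refine ⟨Y, ?_, by simp⟩
    simp [partA]
  | cons z s' ih =>
    intro X Y W A
    have hget : (A ++ X ++ Y ++ (z :: s' ++ W)).getD (A.length + X.length + Y.length) "" = z := by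
      rw [show A ++ X ++ Y ++ (z :: s' ++ W) = (A ++ X ++ Y) ++ z :: (s' ++ W) by simp,
        show A.length + X.length + Y.length = (A ++ X ++ Y).length by simp; omega]
      exact getD_append_len ..
    simp only [List.length_cons, partA, hget]
    by_cases hz : z = pivot ∨ revS z = pivot
    · rw [if_pos hz]
      have hpb : pb pivot z = true := by
        simp only [pb, Bool.or_eq_true, beq_iff_eq]; exact hz
      have hswap : swapL (A ++ X ++ Y ++ (z :: s' ++ W))
            ((((A.length + X.length : Nat) : Int) - 1) + 1).toNat
            (A.length + X.length + Y.length)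
          = A ++ (X ++ [z]) ++ rot Y ++ (s' ++ W) := by
        rw [show ((((A.length + X.length : Nat) : Int) - 1) + 1).toNat = (A ++ X).length by
              simp; omega,
          show A ++ X ++ Y ++ (z :: s' ++ W) = (A ++ X) ++ Y ++ z :: (s' ++ W) by simp,
          show A.length + X.length + Y.length = (A ++ X).length + Y.length by simp]
        rw [swap_block]
        simp
      rw [hswap]
      obtain ⟨Y', hY1, hY2⟩ := ih (X ++ [z]) (rot Y) W A
      have hj : A.length + (X ++ [z]).length + (rot Y).length
          = A.length + X.length + Y.length + 1 := by
        simp [(rot_perm Y).length_eq]; omega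
      have hi : ((A.length + (X ++ [z]).length : Nat) : Int) - 1
          = (((A.length + X.length : Nat) : Int) - 1) + 1 := by
        simp; omega
      rw [hj, hi] at hY1
      refine ⟨Y', ?_, ?_⟩
      · rw [hY1, Prod.mk.injEq]
        constructor
        · simp [hpb]
        · simp [hpb]; omega
      · refine hY2.trans ?_
        simp only [List.filter_cons, hpb]
        exact ((rot_perm Y).append_right _).trans (by simp)
    · rw [if_neg hz]
      have hpb : pb pivot z = false := by
        simp only [pb, Bool.or_eq_false_iff, beq_eq_false_iff_ne, ne_eq]
        exact not_or.mp hz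
      obtain ⟨Y', hY1, hY2⟩ := ih X (Y ++ [z]) W A
      have hj : A.length + X.length + (Y ++ [z]).length
          = A.length + X.length + Y.length + 1 := by
        simp; omega
      rw [hj] at hY1
      have hsh : A ++ X ++ (Y ++ [z]) ++ (s' ++ W) = A ++ X ++ Y ++ (z :: s' ++ W) := by
        simp
      rw [hsh] at hY1
      refine ⟨Y', ?_, ?_⟩
      · rw [hY1, Prod.mk.injEq]
        constructor
        · simp [hpb]
        · simp [hpb]
      · refine hY2.trans ?_
        simp [hpb]

-- A's outer loop computes max(maxi, largest class size among the not yet processed suffix)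
theorem outer_spec : ∀ (fuel : Nat) (T : List String) (low : Nat) (maxi : Int) (high : Nat),
    high = T.length - 1 → high ≤ low + fuel → 1 ≤ maxi →
    outerA fuel T low (low : Int) maxi high
      = max maxi ((gK (Multiset.ofList ((T.drop low).map normS)) : Nat) : Int) := by
  intro fuel
  induction fuel with
  | zero =>
    intro T low maxi high hhigh hfuel hmaxi
    have hcard : ((T.drop low).map normS).length ≤ 1 := by
      simp [List.length_drop]
      omega
    have hg := gK_le_card (Multiset.ofList ((T.drop low).map normS))
    rw [Multiset.coe_card] at hg
    simp only [outerA]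
    omega
  | succ fuel ih =>
    intro T low maxi high hhigh hfuel hmaxi
    by_cases hlh : low < high
    · -- decompose T = take low ++ seg ++ [pv] with pv the pivot at index high
      have hn : T.length = high + 1 := by omega
      have hlow_le : low ≤ T.length := by omega
      set L := T.drop low with hL
      have hLlen : L.length = high + 1 - low := by
        rw [hL, List.length_drop]; omega
      have hLne : L ≠ [] := by
        intro h; rw [h] at hLlen; simp at hLlen; omega
      obtain ⟨seg, pv, hLeq, hseglen⟩ : ∃ seg pv, L = seg ++ [pv] ∧ seg.length = high - low := by
        refine ⟨L.dropLast, L.getLast hLne, ?_, ?_⟩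
        · rw [List.dropLast_append_getLast hLne]
        · rw [List.length_dropLast]; omega
      have hTdec : T = T.take low ++ (seg ++ [pv]) := by
        rw [← hLeq, hL, List.take_append_drop]
      have htakelen : (T.take low).length = low := by
        rw [List.length_take]; omega
      have hpivot : T.getD high "" = pv := by
        conv_lhs => rw [hTdec]
        rw [show T.take low ++ (seg ++ [pv]) = (T.take low ++ seg) ++ [pv] by simp,
          show high = (T.take low ++ seg).length by simp [htakelen]; omega]
        exact getD_append_len ..
      -- run the partition round
      obtain ⟨Y', hpart, hYperm⟩ := partA_spec pv seg [] [] [pv] (T.take low)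
      rw [show (T.take low).length + ([] : List String).length + ([] : List String).length
            = low by simp [htakelen]] at hpart
      simp only [List.append_nil] at hpart
      set F := seg.filter (fun t => pb pv t) with hF
      set G := seg.filter (fun t => !(pb pv t)) with hG
      have hFG : F.length + G.length = seg.length := by
        simpa using (List.length_eq_length_filter_add (l := seg) (fun t => pb pv t)).symm
      have hY'len : Y'.length = G.length := by
        have := hYperm.length_eq; simpa using this
      -- massage hpart into the port's shapes
      rw [hseglen] at hpart
      simp only [List.length_nil, Nat.add_zero, htakelen, List.append_assoc] at hpart
      rw [← hTdec] at hpart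
      -- unfold one outer step
      simp only [outerA, if_pos hlh, hpivot, hpart]
      -- the final swap of the round
      have hpi1 : ((((low + F.length : Nat) : Int) - 1) + 1).toNat = low + F.length := by
        omega
      have hswap : swapL (T.take low ++ (F ++ (Y' ++ [pv])))
            ((((low + F.length : Nat) : Int) - 1) + 1).toNat high
          = ((T.take low ++ F) ++ [pv]) ++ rot Y' := by
        rw [hpi1,
          show T.take low ++ (F ++ (Y' ++ [pv])) = (T.take low ++ F) ++ Y' ++ pv :: [] by simp,
          show low + F.length = (T.take low ++ F).length by simp [htakelen],
          show high = (T.take low ++ F).length + Y'.length by simp [htakelen]; omega]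
        rw [swap_block]
        simp
      rw [hswap]
      -- recurse
      have hlow' : ((((low + F.length : Nat) : Int) - 1) + 1 + 1).toNat
          = low + F.length + 1 := by omega
      have hcounter' : ((low : Nat) : Int)
            + (((((low + F.length : Nat) : Int) - 1) + 1 + 1) - ((low : Nat) : Int))
          = ((low + F.length + 1 : Nat) : Int) := by push_cast; ring
      rw [hlow', hcounter']
      have hT2len : (((T.take low ++ F) ++ [pv]) ++ rot Y').length = high + 1 := by
        have := (rot_perm Y').length_eq
        simp [htakelen, this]
        omega
      rw [ih _ (low + F.length + 1) _ high (by omega) (by omega)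
        (le_trans hmaxi (le_max_left _ _))]
      have hdrop : (((T.take low ++ F) ++ [pv]) ++ rot Y').drop (low + F.length + 1)
          = rot Y' := by
        rw [show low + F.length + 1 = ((T.take low ++ F) ++ [pv]).length by
              simp [htakelen]; omega]
        rw [List.drop_append_of_le_length (le_refl _)]
        simp
      rw [hdrop]
      -- counting: the round removed exactly the pivot's class
      have hbeq : ∀ t, (normS t == normS pv) = pb pv t := by
        intro t
        by_cases h : normS t = normS pv
        · rw [(pb_iff pv t).mpr h]; simp [h]
        · rw [show pb pv t = false by
              cases hpb : pb pv t
              · rfl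
              · exact absurd ((pb_iff pv t).mp hpb) h]
          simp [h]
      have hcount : (Multiset.ofList ((T.drop low).map normS)).count (normS pv)
          = F.length + 1 := by
        rw [← hL, hLeq]
        rw [Multiset.coe_count]
        rw [List.map_append, List.count_append]
        rw [List.count_eq_countP, List.count_eq_countP, List.countP_map, List.countP_map]
        simp only [Function.comp_def, hbeq]
        rw [List.countP_eq_length_filter, ← hF]
        simp [List.countP_eq_length_filter, pb]
      have hfilter : (Multiset.ofList ((T.drop low).map normS)).filter
            (fun j => j ≠ normS pv) = Multiset.ofList (G.map normS) := by
        rw [← hL, hLeq, Multiset.filter_coe, Multiset.coe_eq_coe]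
        rw [List.map_append, List.filter_append]
        rw [List.filter_map, List.filter_map]
        simp only [Function.comp_def]
        have e1 : (fun t => decide (normS t ≠ normS pv)) = (fun t => !(pb pv t)) := by
          funext t
          rw [← hbeq t]
          by_cases h : normS t = normS pv <;> simp [h]
        rw [show seg.filter (fun t => decide (normS t ≠ normS pv)) = G by rw [e1, hG]]
        simp
      have hrotmap : Multiset.ofList ((rot Y').map normS)
          = Multiset.ofList (G.map normS) := by
        rw [Multiset.coe_eq_coe]
        exact (((rot_perm Y').trans (by simpa using hYperm)).map normS)
      have hsplit2 := gK_split (normS pv) (Multiset.ofList ((T.drop low).map normS))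
      rw [hcount, hfilter] at hsplit2
      rw [hrotmap]
      rw [show ((((low + F.length : Nat) : Int) - 1) + 1 + 1) - ((low : Nat) : Int)
            = ((F.length + 1 : Nat) : Int) by push_cast; ring]
      rw [← hL] at hsplit2
      omega
    · simp only [outerA, if_neg hlh]
      have hcard : ((T.drop low).map normS).length ≤ 1 := by
        simp [List.length_drop]; omega
      have hg := gK_le_card (Multiset.ofList ((T.drop low).map normS))
      rw [Multiset.coe_card] at hg
      omega

-- B's fold maintains the counter dict of normal forms and the running maximum (floor 1)
theorem foldB : ∀ (l : List String) (d : PySem.Dict String Int) (best : Int) (K : Multiset String),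
    (∀ k, d.getD k 0 = (K.count k : Int)) → best = max 1 ((gK K : Nat) : Int) →
    (l.foldl (fun (st : PySem.Dict String Int × Int) s =>
        let k := normS s
        let c := st.1.getD k 0 + 1
        (st.1.insert k c, if c > st.2 then c else st.2)) (d, best)).2
      = max 1 ((gK (K + Multiset.ofList (l.map normS)) : Nat) : Int) := by
  intro l
  induction l with
  | nil => intro d best K hd hb; simpa using hb
  | cons s l ih =>
    intro d best K hd hb
    simp only [List.foldl_cons, List.map_cons]
    have hstep := ih (d.insert (normS s) (d.getD (normS s) 0 + 1))
      (if d.getD (normS s) 0 + 1 > best then d.getD (normS s) 0 + 1 else best)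
      ((normS s) ::ₘ K) ?_ ?_
    · rw [hstep]
      congr 3
      rw [← Multiset.cons_coe, ← Multiset.singleton_add, ← Multiset.singleton_add,
        add_left_comm]
      exact add_assoc _ _ _
    · intro k
      rcases eq_or_ne k (normS s) with rfl | hne
      · rw [PySem.Dict.getD_insert_self, hd, Multiset.count_cons_self]; push_cast; ring
      · rw [PySem.Dict.getD_insert_of_ne _ _ _ hne, hd, Multiset.count_cons_of_ne hne]
    · rw [hd, hb, gK_cons]
      rcases le_or_gt ((K.count (normS s) : Int) + 1) (max 1 ((gK K : Nat) : Int)) with h | h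
      · rw [if_neg (not_lt.mpr h)]
        omega
      · rw [if_pos h]
        omega

-- ===== VERDICT (by name: the statement is the Claim_ definition above) =====
theorem strong_string_spec : Claim_equal_strong_string := by
  intro T _
  unfold Spec_strong_string strong_string strong_string_alt
  have hA := outer_spec T.length T 0 1 (T.length - 1) rfl (by omega) (by omega)
  rw [show ((0 : Nat) : Int) = (0 : Int) by simp] at hA
  rw [hA]
  rw [foldB T PySem.Dict.empty 1 0 (fun k => by simp) (by simp [gK])]
  simp
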